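-- pv_equiv track=rewrite | github.com/Thexumaker/NBADataVis- | InitialFunctions.py | seasonPart
-- ===== SOURCE A (Python) =====
-- def seasonPart(season):
--     originalSeason = season
--     newSeason = 0
--     season +=1
--     for i in range(2):
--         newSeason += (season % 10) * 10** i
--         season = season //10
--     return "{}-{}".format(originalSeason,newSeason)
-- ===== SOURCE B (Python) =====
-- def seasonPart(season):
--     return "{}-{}".format(season, (season + 1) % 100)
-- ===== Notes on version B (the rewrite author's own statement) =====
-- stated objective: simpler
-- what changed: Replaces the two-iteration digit-extraction loop (per-digit %10 // 10 with an accumulator) by the closed form (season+1) % 100, which equals the low two base-10 digits for every int under Python's floored modulo.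
import Mathlib
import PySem

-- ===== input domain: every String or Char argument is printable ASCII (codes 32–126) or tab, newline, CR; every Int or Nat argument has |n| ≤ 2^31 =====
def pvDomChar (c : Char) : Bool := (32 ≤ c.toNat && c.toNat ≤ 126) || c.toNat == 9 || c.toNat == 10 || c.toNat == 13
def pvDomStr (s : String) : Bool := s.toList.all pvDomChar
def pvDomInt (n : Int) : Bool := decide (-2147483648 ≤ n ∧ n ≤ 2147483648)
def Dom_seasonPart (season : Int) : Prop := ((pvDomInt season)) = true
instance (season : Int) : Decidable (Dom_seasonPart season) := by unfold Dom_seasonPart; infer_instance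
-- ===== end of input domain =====

-- B replaces A's two-iteration digit-extraction loop by the closed form (season+1) % 100; objective: simpler.
-- ===== PORT A =====
def seasonPart (season : Int) : String :=
  let originalSeason := season
  let season := season + 1
  let st := (PySem.List.pyRange 0 2 1).foldl
    (fun (p : Int × Int) i =>
      (p.1 + PySem.Int.mod p.2 10 * 10 ^ i.toNat, PySem.Int.floordiv p.2 10))
    (0, season)
  PySem.Int.toStr originalSeason ++ "-" ++ PySem.Int.toStr st.1

-- ===== PORT B =====
def seasonPart_alt (season : Int) : String :=
  PySem.Int.toStr season ++ "-" ++ PySem.Int.toStr (PySem.Int.mod (season + 1) 100)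

-- ===== PRECONDITION & SPEC =====
def Spec_seasonPart (season : Int) (out : String) : Prop := out = seasonPart_alt season
instance (season : Int) (out : String) : Decidable (Spec_seasonPart season out) := by unfold Spec_seasonPart; infer_instance

-- ===== CLAIM (what is proved, stated in full; the proofs are below) =====
def Claim_equal_seasonPart : Prop := ∀ (season : Int), Dom_seasonPart season → Spec_seasonPart season (seasonPart season)

-- ===== LEMMAS AND PROOFS =====

-- ===== VERDICT (by name: the statement is the Claim_ definition above) =====
theorem mod100_digits (s : Int) :
    PySem.Int.mod s 10 + PySem.Int.mod (PySem.Int.floordiv s 10) 10 * 10 = PySem.Int.mod s 100 := by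
  rw [PySem.Int.mod_eq_emod_of_pos (by norm_num : (0:Int) < 10),
      PySem.Int.mod_eq_emod_of_pos (by norm_num : (0:Int) < 10),
      PySem.Int.mod_eq_emod_of_pos (by norm_num : (0:Int) < 100),
      PySem.Int.floordiv_eq_ediv_of_pos (by norm_num : (0:Int) < 10)]
  omega

theorem seasonPart_spec : Claim_equal_seasonPart := by
  intro season _
  show seasonPart season = seasonPart_alt season
  unfold seasonPart seasonPart_alt
  have h : PySem.List.pyRange 0 2 1 = [0, 1] := by decide
  simp only [h, List.foldl]
  rw [show ((0:Int) + PySem.Int.mod (season+1) 10 * 10 ^ (0:Int).toNat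
        + PySem.Int.mod (PySem.Int.floordiv (season+1) 10) 10 * 10 ^ (1:Int).toNat)
      = PySem.Int.mod (season+1) 100 from by
    rw [← mod100_digits (season+1)]; push_cast; ring]
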